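-- pv_equiv track=rewrite | github.com/fasferraz/eNB | eNAS.py | decode_apn
-- ===== SOURCE A (Python) =====
-- def decode_apn(byteArray):
--     a = []
--     pos = 0
--     while pos < len(byteArray):
--         i = int(byteArray[pos])
--         for x in range(pos+1, pos+1+i):
--             a.append(chr(byteArray[x]))
--
--         a.append(".")
--         pos = pos+1+i
--
--     return [('apn', ''.join(a)[:-1])]
-- ===== SOURCE B (Python) =====
-- def decode_apn(byteArray):
--     # Consume the list label by label: decode each length-prefixed label into a
--     # complete string, collect the labels, and join them with '.' at the end
--     # (A instead fills a flat char buffer with a '.' sentinel after every label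
--     # and strips the final sentinel).
--     labels = []
--     rest = list(byteArray)
--     while rest:
--         i = int(rest[0])
--         labels.append(''.join(chr(rest[k]) for k in range(1, 1 + i)))
--         rest = rest[1 + i:]
--     return [('apn', '.'.join(labels))]
-- ===== Notes on version B (the rewrite author's own statement) =====
-- stated objective: simpler
-- what changed: B decodes label by label, consuming the list via slices and collecting complete label strings that are joined with '.' at the end, instead of A's flat character buffer with a '.' sentinel appended after every label and stripped at the end; Pre_ additionally excludes lone-surrogate label bytes (0xD800-0xDFFF), on which A returns a string that is not representable as a Lean String.
import Mathlib
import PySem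

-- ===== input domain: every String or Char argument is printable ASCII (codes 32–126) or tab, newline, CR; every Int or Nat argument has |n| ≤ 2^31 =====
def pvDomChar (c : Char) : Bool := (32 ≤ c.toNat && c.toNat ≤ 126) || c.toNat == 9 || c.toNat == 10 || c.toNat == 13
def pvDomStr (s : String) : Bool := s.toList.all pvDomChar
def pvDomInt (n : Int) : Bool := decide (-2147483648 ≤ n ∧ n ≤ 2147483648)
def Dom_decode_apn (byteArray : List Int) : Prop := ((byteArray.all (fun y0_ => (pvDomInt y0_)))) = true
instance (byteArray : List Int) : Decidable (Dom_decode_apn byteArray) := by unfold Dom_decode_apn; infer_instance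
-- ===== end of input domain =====

-- B decodes label by label (slices collected into a list of label strings joined with '.'),
-- instead of A's flat char buffer with a '.' sentinel appended per label and stripped at the end;
-- same cost, simpler decomposition. Pre_ also excludes lone-surrogate label bytes (A returns a
-- string not representable as a Lean String) — see the comment at Pre_decode_apn.


-- ===== PORT A =====
-- chr(b): exact for Unicode scalar values (Pre_ restricts label bytes to those)
def toPyChr (b : Int) : Char := Char.ofNat b.toNat

-- the while loop of A: state is (pos, a); fuel is only a totality guard (under Pre_ the
-- loop runs at most byteArray.length times, pos strictly increasing)
def decodeApnLoopA (bs : List Int) : Nat → Int → List Char → List Char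
  | 0, _, a => a
  | fuel + 1, pos, a =>
    if pos < (bs.length : Int) then
      let i : Int := PySem.List.pyGetD bs pos 0            -- i = int(byteArray[pos])
      let a := (PySem.List.pyRange (pos + 1) (pos + 1 + i) 1).foldl
        (fun acc x => acc ++ [toPyChr (PySem.List.pyGetD bs x 0)]) a   -- for x in range: a.append(chr(byteArray[x]))
      decodeApnLoopA bs fuel (pos + 1 + i) (a ++ ['.'])    -- a.append("."); pos = pos+1+i
    else a

def decode_apn (byteArray : List Int) : List (String × String) :=
  let a := decodeApnLoopA byteArray (byteArray.length + 1) 0 []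
  -- ''.join(a)[:-1] : a is the list of 1-char strings, joined then sliced [:-1]
  [("apn", String.ofList (PySem.List.slice a none (some (-1))))]

-- ===== PORT B =====
-- the while loop of B: state is (rest, labels)
def decodeApnLoopB : Nat → List Int → List String → List String
  | 0, _, labels => labels
  | fuel + 1, rest, labels =>
    if rest = [] then labels
    else
      let i : Int := PySem.List.pyGetD rest 0 0                         -- i = int(rest[0])
      let lab := String.ofList ((PySem.List.pyRange 1 (1 + i) 1).map
        (fun k => toPyChr (PySem.List.pyGetD rest k 0)))                -- ''.join(chr(rest[k]) for k in range(1, 1+i))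
      decodeApnLoopB fuel (PySem.List.slice rest (some (1 + i)) none) (labels ++ [lab])
                                                                        -- rest = rest[1+i:]

def decode_apn_alt (byteArray : List Int) : List (String × String) :=
  [("apn", PySem.Str.join "." (decodeApnLoopB (byteArray.length + 1) byteArray []))]

-- ===== PRECONDITION & SPEC =====
-- a byte A may pass to chr and still produce a Lean-representable character:
-- a Unicode scalar value (chr also accepts lone surrogates 0xD800-0xDFFF, on which A returns a
-- string that List Char/String cannot represent; Pre_ excludes those, see claim cites)
def okByte (b : Int) : Bool := decide (0 ≤ b) && (decide (b < 55296) || (decide (57343 < b) && decide (b < 1114112)))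

-- one-pass well-formedness scan: at a length byte (k = 0) the declared label must fit the
-- remaining bytes; inside a label (k = j+1) every byte must be a Unicode scalar value
def validAPNAux : List Int → Nat → Bool
  | [], k => decide (k = 0)
  | b :: rest, 0 => decide (0 ≤ b) && decide (b ≤ (rest.length : Int)) && validAPNAux rest b.toNat
  | b :: rest, k + 1 => okByte b && validAPNAux rest k

-- Pre_ excludes inputs where A raises (negative/overrunning length bytes: IndexError or divergence;
-- bytes ≥ 0x110000: ValueError from chr) and inputs with lone-surrogate label bytes, on which A
-- returns a string not representable in the Lean String type (B returns the same string there).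
def Pre_decode_apn (byteArray : List Int) : Prop := validAPNAux byteArray 0 = true
instance (byteArray : List Int) : Decidable (Pre_decode_apn byteArray) := by
  unfold Pre_decode_apn; infer_instance

def pvWitness_decode_apn : List Int := [3, 97, 98, 99, 2, 100, 101]

def Spec_decode_apn (byteArray : List Int) (out : List (String × String)) : Prop := out = decode_apn_alt byteArray
instance (byteArray : List Int) (out : List (String × String)) : Decidable (Spec_decode_apn byteArray out) := by unfold Spec_decode_apn; infer_instance

-- ===== CLAIM (what is proved, stated in full; the proofs are below) =====
def Claim_equal_decode_apn : Prop := ∀ (byteArray : List Int), Dom_decode_apn byteArray → Pre_decode_apn byteArray → Spec_decode_apn byteArray (decode_apn byteArray)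

-- ===== LEMMAS AND PROOFS =====

-- the list of decoded labels, as char lists (the common denominator of both loops)
def charLabels : List Int → List (List Char)
  | [] => []
  | n :: rest => (rest.take n.toNat).map toPyChr :: charLabels (rest.drop n.toNat)
  termination_by l => l.length
  decreasing_by simp [List.length_drop]

-- A's buffer contents: each label followed by a '.' sentinel
def dotFlat : List (List Char) → List Char
  | [] => []
  | c :: t => c ++ '.' :: dotFlat t

lemma validAPNAux_skip : ∀ (k : Nat) (l : List Int), k ≤ l.length →
    validAPNAux l k = ((l.take k).all okByte && validAPNAux (l.drop k) 0)
  | 0, l, _ => by simp [List.take_zero, List.drop_zero]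
  | k + 1, [], h => by simp at h
  | k + 1, b :: rest, h => by
    rw [show validAPNAux (b :: rest) (k + 1) = (okByte b && validAPNAux rest k) from rfl]
    rw [validAPNAux_skip k rest (by simpa using h)]
    simp [List.take_succ_cons, List.drop_succ_cons, Bool.and_assoc]

lemma validAPN_cons {n : Int} {rest : List Int} (h : validAPNAux (n :: rest) 0 = true) :
    0 ≤ n ∧ n ≤ (rest.length : Int) ∧ (rest.take n.toNat).all okByte = true ∧
      validAPNAux (rest.drop n.toNat) 0 = true := by
  rw [show validAPNAux (n :: rest) 0
      = (decide (0 ≤ n) && decide (n ≤ (rest.length : Int)) && validAPNAux rest n.toNat) from rfl] at h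
  simp only [Bool.and_eq_true, decide_eq_true_eq] at h
  obtain ⟨⟨hn0, hnle⟩, haux⟩ := h
  rw [validAPNAux_skip n.toNat rest (by omega)] at haux
  simp only [Bool.and_eq_true] at haux
  exact ⟨hn0, hnle, haux.1, haux.2⟩

lemma map_range_getD (bs : List Int) (s m : Nat) (h : s + m ≤ bs.length) :
    (List.range m).map (fun k => bs.getD (s + k) 0) = (bs.drop s).take m := by
  apply List.ext_getElem
  · simp; omega
  · intro j h1 h2
    have hj : j < m := by simpa using h1
    have hsj : s + j < bs.length := by omega
    simp [List.getD_eq_getElem?_getD, List.getElem?_eq_getElem hsj]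

lemma decodeApnLoopA_eq (bs : List Int) :
    ∀ (fuel p : Nat) (a : List Char), validAPNAux (bs.drop p) 0 = true →
      bs.length - p < fuel →
      decodeApnLoopA bs fuel (p : Int) a = a ++ dotFlat (charLabels (bs.drop p))
  | 0, p, a, hv, hf => by omega
  | fuel + 1, p, a, hv, hf => by
    by_cases hp : p < bs.length
    · have hdrop : bs.drop p = bs[p] :: bs.drop (p + 1) := List.drop_eq_getElem_cons hp
      rw [hdrop] at hv
      obtain ⟨hn0, hnle, hok, hvrest⟩ := validAPN_cons hv
      have hlen : (bs[p]).toNat ≤ bs.length - (p + 1) := by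
        simp [List.length_drop] at hnle; omega
      rw [decodeApnLoopA]
      rw [if_pos (by exact_mod_cast hp)]
      have hi : PySem.List.pyGetD bs (p : Int) 0 = bs[p] := by
        rw [PySem.List.pyGetD_natCast, List.getD_eq_getElem?_getD, List.getElem?_eq_getElem hp]
        rfl
      simp only [hi]
      rw [PySem.List.foldl_append_singleton_eq_map]
      have hrange : (PySem.List.pyRange ((p : Int) + 1) ((p : Int) + 1 + bs[p]) 1).map
          (fun x => toPyChr (PySem.List.pyGetD bs x 0))
          = ((bs.drop (p + 1)).take (bs[p]).toNat).map toPyChr := by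
        rw [PySem.List.pyRange_one, List.map_map]
        have hm : ((p : Int) + 1 + bs[p] - ((p : Int) + 1)).toNat = (bs[p]).toNat := by omega
        rw [hm, ← map_range_getD bs (p + 1) (bs[p]).toNat (by omega), List.map_map]
        apply List.map_congr_left
        intro k _
        have harg : (p : Int) + 1 + (k : Int) = ((p + 1 + k : Nat) : Int) := by push_cast; ring
        simp only [Function.comp_apply]
        rw [harg, PySem.List.pyGetD_natCast]
      rw [hrange]
      have hpos : (p : Int) + 1 + bs[p] = ((p + 1 + (bs[p]).toNat : Nat) : Int) := by
        push_cast [Int.toNat_of_nonneg hn0]; ring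
      rw [hpos]
      have hvrest' : validAPNAux (bs.drop (p + 1 + (bs[p]).toNat)) 0 = true := by
        rwa [List.drop_drop] at hvrest
      rw [decodeApnLoopA_eq bs fuel (p + 1 + (bs[p]).toNat) _ hvrest' (by omega)]
      rw [hdrop, charLabels, dotFlat, List.drop_drop]
      simp [List.append_assoc]
    · have hnil : bs.drop p = [] := List.drop_eq_nil_of_le (by omega)
      rw [decodeApnLoopA, if_neg (by exact_mod_cast hp), hnil, charLabels, dotFlat, List.append_nil]
  termination_by fuel => fuel

lemma decodeApnLoopB_eq :
    ∀ (fuel : Nat) (rest : List Int) (labels : List String), validAPNAux rest 0 = true →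
      rest.length < fuel →
      decodeApnLoopB fuel rest labels = labels ++ (charLabels rest).map String.ofList
  | 0, rest, labels, hv, hf => by omega
  | fuel + 1, [], labels, hv, hf => by
    rw [decodeApnLoopB, if_pos rfl, charLabels]
    rw [List.map_nil, List.append_nil]
  | fuel + 1, n :: t, labels, hv, hf => by
    obtain ⟨hn0, hnle, hok, hvrest⟩ := validAPN_cons hv
    rw [decodeApnLoopB, if_neg (List.cons_ne_nil n t)]
    have hi : PySem.List.pyGetD (n :: t) 0 0 = n := PySem.List.pyGetD_zero_cons n t 0
    simp only [hi]
    have htn : ((1 : Int) + n).toNat = 1 + n.toNat := by omega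
    have hsl1 : (PySem.List.pyRange 1 (1 + n) 1).map (fun k => toPyChr (PySem.List.pyGetD (n :: t) k 0))
        = (t.take n.toNat).map toPyChr := by
      rw [PySem.List.pyRange_one, List.map_map]
      have hm : ((1 : Int) + n - 1).toNat = n.toNat := by omega
      have hfit : 1 + n.toNat ≤ (n :: t).length := by simp [List.length_cons]; omega
      have hmr := map_range_getD (n :: t) 1 n.toNat hfit
      rw [show List.drop 1 (n :: t) = t from rfl] at hmr
      rw [hm, ← hmr, List.map_map]
      apply List.map_congr_left
      intro k _
      have harg : (1 : Int) + (k : Int) = ((1 + k : Nat) : Int) := by push_cast; ring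
      simp only [Function.comp_apply]
      rw [harg, PySem.List.pyGetD_natCast]
    have hsl2 : PySem.List.slice (n :: t) (some (1 + n)) none = t.drop n.toNat := by
      rw [PySem.List.slice_from _ (by omega), htn, Nat.add_comm 1 n.toNat, List.drop_succ_cons]
    rw [hsl1, hsl2]
    rw [decodeApnLoopB_eq fuel (t.drop n.toNat) _ hvrest
      (by simp only [List.length_drop, List.length_cons] at hf ⊢; omega)]
    rw [charLabels]
    simp [List.append_assoc]
  termination_by fuel => fuel

lemma dropLast_dotFlat : ∀ L : List (List Char), (dotFlat L).dropLast = PySem.Chars.join ['.'] L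
  | [] => by simp [dotFlat, PySem.Chars.join_nil]
  | [c] => by
    rw [dotFlat, dotFlat, PySem.Chars.join_singleton]
    exact List.dropLast_concat
  | c :: c2 :: t => by
    have hne : dotFlat (c2 :: t) ≠ [] := by rw [dotFlat]; simp
    rw [dotFlat, PySem.Chars.join_cons_cons]
    have hsplit : c ++ '.' :: dotFlat (c2 :: t) = (c ++ ['.']) ++ dotFlat (c2 :: t) := by simp
    rw [hsplit, List.dropLast_append_of_ne_nil hne, dropLast_dotFlat (c2 :: t)]

-- ===== VERDICT (by name: the statement is the Claim_ definition above) =====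
theorem decode_apn_spec : Claim_equal_decode_apn := by
  intro bs hdom hpre
  unfold Spec_decode_apn
  have hA := decodeApnLoopA_eq bs (bs.length + 1) 0 [] (by simpa using hpre) (by omega)
  have hB := decodeApnLoopB_eq (bs.length + 1) bs [] hpre (by omega)
  simp only [Nat.cast_zero, List.drop_zero, List.nil_append] at hA hB
  simp only [decode_apn, decode_apn_alt, hA, hB, PySem.List.slice_to_neg_one, dropLast_dotFlat]
  simp [PySem.Str.join, List.map_map, Function.comp_def]
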